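-- pv_equiv track=rewrite | github.com/vmasalkina/telegramXObot | bot_move.py | count_XO
-- ===== SOURCE A (Python) =====
-- def countRow(m, i, xo):
--     return m[i].count(xo)
--
-- def countCol(m, i, xo):
--     return [r[i] for r in m].count(xo)
--
-- def countDiag1(m, xo):
--     return [m[i][i] for i in range(3)].count(xo)
--
-- def countDiag2(m, xo):
--     return [m[i][2-i] for i in range(3)].count(xo)
--
-- def count_XO(m, xo):
--     # Возвращает список с количеством элемента 'xo' в каждой строке
--     count_list = []
--     for i in range(3):
--         count_list.append(countRow(m, i, xo))
--     for i in range(3):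
--         count_list.append(countCol(m, i, xo))
--     count_list.append(countDiag1(m, xo))
--     count_list.append(countDiag2(m, xo))
--     return count_list
-- ===== SOURCE B (Python) =====
-- def count_XO(m, xo):
--     # one accumulating pass for the three rows + both diagonals, then one for the columns
--     row = [0, 0, 0]
--     d1 = 0
--     d2 = 0
--     for i in range(3):
--         for j, v in enumerate(m[i]):
--             if v == xo:
--                 row[i] += 1
--                 if j == i:
--                     d1 += 1
--                 if j == 2 - i:
--                     d2 += 1
--     col = [0, 0, 0]
--     for r in m:
--         for j in range(3):
--             if r[j] == xo:
--                 col[j] += 1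
--     return row + col + [d1, d2]
-- ===== Notes on version B (the rewrite author's own statement) =====
-- stated objective: alternative
-- what changed: Replaces A's eight separate build-a-line-then-count scans (per-row .count, per-column comprehension+count, two diagonal comprehensions+count) with one single nested pass over the grid that increments row/col/diagonal accumulators per matching cell.
import Mathlib
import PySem

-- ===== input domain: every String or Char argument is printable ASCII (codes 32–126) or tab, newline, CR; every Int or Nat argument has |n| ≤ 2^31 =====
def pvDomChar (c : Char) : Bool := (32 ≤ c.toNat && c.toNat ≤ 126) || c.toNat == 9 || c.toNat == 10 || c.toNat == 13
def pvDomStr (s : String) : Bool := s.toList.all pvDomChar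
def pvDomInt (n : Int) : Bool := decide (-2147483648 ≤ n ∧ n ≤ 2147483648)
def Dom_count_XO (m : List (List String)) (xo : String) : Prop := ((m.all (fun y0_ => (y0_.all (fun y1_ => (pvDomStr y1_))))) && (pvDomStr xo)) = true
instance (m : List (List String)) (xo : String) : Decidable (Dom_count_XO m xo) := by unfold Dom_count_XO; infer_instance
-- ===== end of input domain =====

-- B replaces A's eight build-a-line-then-count scans with two accumulating passes over the grid (alternative decomposition, same cost).


-- ===== PORT A =====
def countRow (m : List (List String)) (i : Int) (xo : String) : Int :=
  PySem.List.count (PySem.List.pyGetD m i []) xo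

def countCol (m : List (List String)) (i : Int) (xo : String) : Int :=
  PySem.List.count (m.map (fun r => PySem.List.pyGetD r i "")) xo

def countDiag1 (m : List (List String)) (xo : String) : Int :=
  PySem.List.count ((PySem.List.pyRange 0 3 1).map
    (fun i => PySem.List.pyGetD (PySem.List.pyGetD m i []) i "")) xo

def countDiag2 (m : List (List String)) (xo : String) : Int :=
  PySem.List.count ((PySem.List.pyRange 0 3 1).map
    (fun i => PySem.List.pyGetD (PySem.List.pyGetD m i []) (2 - i) "")) xo

def count_XO (m : List (List String)) (xo : String) : List Int :=
  let cl : List Int := []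
  let cl := (PySem.List.pyRange 0 3 1).foldl (fun acc i => acc ++ [countRow m i xo]) cl
  let cl := (PySem.List.pyRange 0 3 1).foldl (fun acc i => acc ++ [countCol m i xo]) cl
  let cl := cl ++ [countDiag1 m xo]
  let cl := cl ++ [countDiag2 m xo]
  cl

-- ===== PORT B =====
-- body of B's first inner loop: cell (i, j) holding v feeds row i and the two diagonals
def stepRow (xo : String) (s : List Int × Int × Int) (i j : Int) (v : String) :
    List Int × Int × Int :=
  let (row, d1, d2) := s
  if v = xo then
    (PySem.List.pySetD row i (PySem.List.pyGetD row i 0 + 1),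
     (if j = i then d1 + 1 else d1),
     (if j = 2 - i then d2 + 1 else d2))
  else s

-- body of B's second inner loop: cell j of row r feeds column j
def stepCol (xo : String) (col : List Int) (r : List String) (j : Int) : List Int :=
  if PySem.List.pyGetD r j "" = xo then
    PySem.List.pySetD col j (PySem.List.pyGetD col j 0 + 1)
  else col

-- B's second inner loop over one row r (the three column cells)
def colPass (xo : String) (col : List Int) (r : List String) : List Int :=
  (PySem.List.pyRange 0 3 1).foldl (fun col j => stepCol xo col r j) col

def count_XO_alt (m : List (List String)) (xo : String) : List Int :=
  let s1 := (PySem.List.pyRange 0 3 1).foldl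
    (fun s i => (PySem.List.enumerate (PySem.List.pyGetD m i []) 0).foldl
      (fun s q => stepRow xo s i q.1 q.2) s)
    (([0, 0, 0] : List Int), (0 : Int), (0 : Int))
  let col := m.foldl (fun col r => colPass xo col r) ([0, 0, 0] : List Int)
  s1.1 ++ col ++ [s1.2.1, s1.2.2]

-- ===== PRECONDITION & SPEC =====
-- Pre_ is exactly the inputs on which A (and B) returns: with fewer than 3 rows, or some
-- row shorter than 3, the indexing scans of both raise IndexError.
def Pre_count_XO (m : List (List String)) (xo : String) : Prop :=
  3 ≤ m.length ∧ ∀ r ∈ m, 3 ≤ r.length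
instance (m : List (List String)) (xo : String) : Decidable (Pre_count_XO m xo) := by
  unfold Pre_count_XO; infer_instance

def pvWitness_count_XO : List (List String) × String :=
  ([["X", "", "O"], ["", "X", ""], ["O", "", "X"]], "X")

def Spec_count_XO (m : List (List String)) (xo : String) (out : List Int) : Prop := out = count_XO_alt m xo
instance (m : List (List String)) (xo : String) (out : List Int) : Decidable (Spec_count_XO m xo out) := by unfold Spec_count_XO; infer_instance

-- ===== CLAIM (what is proved, stated in full; the proofs are below) =====
def Claim_equal_count_XO : Prop := ∀ (m : List (List String)) (xo : String), Dom_count_XO m xo → Pre_count_XO m xo → Spec_count_XO m xo (count_XO m xo)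

-- ===== LEMMAS AND PROOFS =====

-- 0/1 indicator of one cell matching xo
def ind (x xo : String) : Int := if x = xo then 1 else 0

-- the row-only effect of a cell whose column index is ≥ 3
def bump (xo : String) (i : Int) (row : List Int) (v : String) : List Int :=
  if v = xo then PySem.List.pySetD row i (PySem.List.pyGetD row i 0 + 1) else row

lemma pyRange3 : PySem.List.pyRange 0 3 1 = [0, 1, 2] := by decide

lemma enum_nil {α : Type} (s : Int) : PySem.List.enumerate ([] : List α) s = [] := by
  simp [PySem.List.enumerate]

lemma enum_cons {α : Type} (x : α) (xs : List α) (s : Int) :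
    PySem.List.enumerate (x :: xs) s = (s, x) :: PySem.List.enumerate xs (s + 1) := by
  simp [PySem.List.enumerate]

lemma enum3 {α : Type} (a b c : α) (t : List α) :
    PySem.List.enumerate (a :: b :: c :: t) 0
    = (0, a) :: (1, b) :: (2, c) :: PySem.List.enumerate t 3 := by
  rw [enum_cons, enum_cons, enum_cons]; norm_num

lemma getD0 {α : Type} (x0 x1 x2 : α) (t : List α) (d : α) :
    PySem.List.pyGetD (x0 :: x1 :: x2 :: t) 0 d = x0 := by
  simp [PySem.List.pyGetD, PySem.List.pyGet?, PySem.List.pyIdx?,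
    (show (0:Int) ≤ (t.length : Int) + 1 + 1 by omega)]

lemma getD1 {α : Type} (x0 x1 x2 : α) (t : List α) (d : α) :
    PySem.List.pyGetD (x0 :: x1 :: x2 :: t) 1 d = x1 := by
  simp [PySem.List.pyGetD, PySem.List.pyGet?, PySem.List.pyIdx?,
    (show (1:Int) < (t.length : Int) + 1 + 1 + 1 by omega)]

lemma getD2 {α : Type} (x0 x1 x2 : α) (t : List α) (d : α) :
    PySem.List.pyGetD (x0 :: x1 :: x2 :: t) 2 d = x2 := by
  simp [PySem.List.pyGetD, PySem.List.pyGet?, PySem.List.pyIdx?,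
    (show (2:Int) < (t.length : Int) + 1 + 1 + 1 by omega)]

lemma count_cons_int (xo x : String) (l : List String) :
    ((List.count xo (x :: l) : Nat) : Int) = ind x xo + ((List.count xo l : Nat) : Int) := by
  by_cases h : x = xo <;> simp [List.count_cons, h, ind] <;> omega

-- a cell with column index ≥ 3 only (possibly) bumps the row accumulator
lemma stepRow_big (xo : String) (row : List Int) (d1 d2 : Int) (i j : Int) (v : String)
    (hi0 : 0 ≤ i) (hi3 : i < 3) (hj : 3 ≤ j) :
    stepRow xo (row, d1, d2) i j v = (bump xo i row v, d1, d2) := by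
  by_cases hv : v = xo
  · simp only [stepRow, bump, hv, if_pos, if_true]
    simp
    exact ⟨by omega, by omega⟩
  · simp [stepRow, bump, hv]

-- the tail (j ≥ 3) of one row only feeds the row accumulator
lemma inner_tail (xo : String) (i : Int) (hi0 : 0 ≤ i) (hi3 : i < 3) (t : List String)
    (s : Int) (hs : 3 ≤ s) (row : List Int) (d1 d2 : Int) :
    (PySem.List.enumerate t s).foldl (fun st q => stepRow xo st i q.1 q.2) (row, d1, d2)
    = (t.foldl (bump xo i) row, d1, d2) := by
  induction t generalizing s row with
  | nil => simp [enum_nil]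
  | cons v t ih =>
      rw [enum_cons]
      simp only [List.foldl_cons]
      rw [stepRow_big xo row d1 d2 i s v hi0 hi3 hs]
      exact ih (s + 1) (by omega) (bump xo i row v)

lemma bump_fold0 (xo : String) (t : List String) (p0 p1 p2 : Int) :
    t.foldl (bump xo 0) [p0, p1, p2] = [p0 + ((List.count xo t : Nat) : Int), p1, p2] := by
  induction t generalizing p0 with
  | nil => simp
  | cons v t ih =>
      by_cases h : v = xo <;>
        simp only [List.foldl_cons, bump, h, if_pos, if_neg, not_false_eq_true, if_true] <;>
        simp [PySem.List.pySetD, PySem.List.pySet?, PySem.List.pyGetD, PySem.List.pyGet?,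
          PySem.List.pyIdx?, ih, count_cons_int, ind, h] <;> omega

lemma bump_fold1 (xo : String) (t : List String) (p0 p1 p2 : Int) :
    t.foldl (bump xo 1) [p0, p1, p2] = [p0, p1 + ((List.count xo t : Nat) : Int), p2] := by
  induction t generalizing p1 with
  | nil => simp
  | cons v t ih =>
      by_cases h : v = xo <;>
        simp only [List.foldl_cons, bump, h, if_pos, if_neg, not_false_eq_true, if_true] <;>
        simp [PySem.List.pySetD, PySem.List.pySet?, PySem.List.pyGetD, PySem.List.pyGet?,
          PySem.List.pyIdx?, ih, count_cons_int, ind, h] <;> omega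

lemma bump_fold2 (xo : String) (t : List String) (p0 p1 p2 : Int) :
    t.foldl (bump xo 2) [p0, p1, p2] = [p0, p1, p2 + ((List.count xo t : Nat) : Int)] := by
  induction t generalizing p2 with
  | nil => simp
  | cons v t ih =>
      by_cases h : v = xo <;>
        simp only [List.foldl_cons, bump, h, if_pos, if_neg, not_false_eq_true, if_true] <;>
        simp [PySem.List.pySetD, PySem.List.pySet?, PySem.List.pyGetD, PySem.List.pyGet?,
          PySem.List.pyIdx?, ih, count_cons_int, ind, h] <;> omega

-- stepRow on the 3x3 frame, state written out
lemma rs00 (xo v : String) (p0 p1 p2 d1 d2 : Int) :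
    stepRow xo ([p0,p1,p2],d1,d2) 0 0 v = ([p0 + ind v xo, p1, p2], d1 + ind v xo, d2) := by
  by_cases h : v = xo <;>
    simp [stepRow, ind, h, PySem.List.pySetD, PySem.List.pySet?, PySem.List.pyGetD,
      PySem.List.pyGet?, PySem.List.pyIdx?] <;> norm_num

lemma rs01 (xo v : String) (p0 p1 p2 d1 d2 : Int) :
    stepRow xo ([p0,p1,p2],d1,d2) 0 1 v = ([p0 + ind v xo, p1, p2], d1, d2) := by
  by_cases h : v = xo <;>
    simp [stepRow, ind, h, PySem.List.pySetD, PySem.List.pySet?, PySem.List.pyGetD,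
      PySem.List.pyGet?, PySem.List.pyIdx?] <;> norm_num

lemma rs02 (xo v : String) (p0 p1 p2 d1 d2 : Int) :
    stepRow xo ([p0,p1,p2],d1,d2) 0 2 v = ([p0 + ind v xo, p1, p2], d1, d2 + ind v xo) := by
  by_cases h : v = xo <;>
    simp [stepRow, ind, h, PySem.List.pySetD, PySem.List.pySet?, PySem.List.pyGetD,
      PySem.List.pyGet?, PySem.List.pyIdx?] <;> norm_num

lemma rs10 (xo v : String) (p0 p1 p2 d1 d2 : Int) :
    stepRow xo ([p0,p1,p2],d1,d2) 1 0 v = ([p0, p1 + ind v xo, p2], d1, d2) := by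
  by_cases h : v = xo <;>
    simp [stepRow, ind, h, PySem.List.pySetD, PySem.List.pySet?, PySem.List.pyGetD,
      PySem.List.pyGet?, PySem.List.pyIdx?] <;> norm_num

lemma rs11 (xo v : String) (p0 p1 p2 d1 d2 : Int) :
    stepRow xo ([p0,p1,p2],d1,d2) 1 1 v = ([p0, p1 + ind v xo, p2], d1 + ind v xo, d2 + ind v xo) := by
  by_cases h : v = xo <;>
    simp [stepRow, ind, h, PySem.List.pySetD, PySem.List.pySet?, PySem.List.pyGetD,
      PySem.List.pyGet?, PySem.List.pyIdx?] <;> norm_num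

lemma rs12 (xo v : String) (p0 p1 p2 d1 d2 : Int) :
    stepRow xo ([p0,p1,p2],d1,d2) 1 2 v = ([p0, p1 + ind v xo, p2], d1, d2) := by
  by_cases h : v = xo <;>
    simp [stepRow, ind, h, PySem.List.pySetD, PySem.List.pySet?, PySem.List.pyGetD,
      PySem.List.pyGet?, PySem.List.pyIdx?] <;> norm_num

lemma rs20 (xo v : String) (p0 p1 p2 d1 d2 : Int) :
    stepRow xo ([p0,p1,p2],d1,d2) 2 0 v = ([p0, p1, p2 + ind v xo], d1, d2 + ind v xo) := by
  by_cases h : v = xo <;>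
    simp [stepRow, ind, h, PySem.List.pySetD, PySem.List.pySet?, PySem.List.pyGetD,
      PySem.List.pyGet?, PySem.List.pyIdx?] <;> norm_num

lemma rs21 (xo v : String) (p0 p1 p2 d1 d2 : Int) :
    stepRow xo ([p0,p1,p2],d1,d2) 2 1 v = ([p0, p1, p2 + ind v xo], d1, d2) := by
  by_cases h : v = xo <;>
    simp [stepRow, ind, h, PySem.List.pySetD, PySem.List.pySet?, PySem.List.pyGetD,
      PySem.List.pyGet?, PySem.List.pyIdx?] <;> norm_num

lemma rs22 (xo v : String) (p0 p1 p2 d1 d2 : Int) :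
    stepRow xo ([p0,p1,p2],d1,d2) 2 2 v = ([p0, p1, p2 + ind v xo], d1 + ind v xo, d2) := by
  by_cases h : v = xo <;>
    simp [stepRow, ind, h, PySem.List.pySetD, PySem.List.pySet?, PySem.List.pyGetD,
      PySem.List.pyGet?, PySem.List.pyIdx?] <;> norm_num

-- one full row of B's first loop, row index 0, 1, 2
lemma inner_row0 (xo x0 x1 x2 : String) (t : List String) (p0 p1 p2 d1 d2 : Int) :
    (PySem.List.enumerate (x0::x1::x2::t) 0).foldl (fun s q => stepRow xo s 0 q.1 q.2)
      ([p0,p1,p2],d1,d2)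
    = ([p0 + ind x0 xo + ind x1 xo + ind x2 xo + ((List.count xo t : Nat) : Int), p1, p2],
       d1 + ind x0 xo, d2 + ind x2 xo) := by
  rw [enum3]
  simp only [List.foldl_cons]
  rw [rs00, rs01, rs02, inner_tail xo 0 (by norm_num) (by norm_num) t 3 (by norm_num),
      bump_fold0]

lemma inner_row1 (xo x0 x1 x2 : String) (t : List String) (p0 p1 p2 d1 d2 : Int) :
    (PySem.List.enumerate (x0::x1::x2::t) 0).foldl (fun s q => stepRow xo s 1 q.1 q.2)
      ([p0,p1,p2],d1,d2)
    = ([p0, p1 + ind x0 xo + ind x1 xo + ind x2 xo + ((List.count xo t : Nat) : Int), p2],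
       d1 + ind x1 xo, d2 + ind x1 xo) := by
  rw [enum3]
  simp only [List.foldl_cons]
  rw [rs10, rs11, rs12, inner_tail xo 1 (by norm_num) (by norm_num) t 3 (by norm_num),
      bump_fold1]

lemma inner_row2 (xo x0 x1 x2 : String) (t : List String) (p0 p1 p2 d1 d2 : Int) :
    (PySem.List.enumerate (x0::x1::x2::t) 0).foldl (fun s q => stepRow xo s 2 q.1 q.2)
      ([p0,p1,p2],d1,d2)
    = ([p0, p1, p2 + ind x0 xo + ind x1 xo + ind x2 xo + ((List.count xo t : Nat) : Int)],
       d1 + ind x2 xo, d2 + ind x0 xo) := by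
  rw [enum3]
  simp only [List.foldl_cons]
  rw [rs20, rs21, rs22, inner_tail xo 2 (by norm_num) (by norm_num) t 3 (by norm_num),
      bump_fold2]

-- stepCol at the three column indices, for an arbitrary row
lemma cs0 (xo : String) (r : List String) (q0 q1 q2 : Int) :
    stepCol xo [q0,q1,q2] r 0 = [q0 + ind (PySem.List.pyGetD r 0 "") xo, q1, q2] := by
  by_cases h : PySem.List.pyGetD r 0 "" = xo <;>
    simp [stepCol, ind, h, PySem.List.pySetD, PySem.List.pySet?, PySem.List.pyIdx?,
      getD0, getD1, getD2] <;> norm_num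

lemma cs1 (xo : String) (r : List String) (q0 q1 q2 : Int) :
    stepCol xo [q0,q1,q2] r 1 = [q0, q1 + ind (PySem.List.pyGetD r 1 "") xo, q2] := by
  by_cases h : PySem.List.pyGetD r 1 "" = xo <;>
    simp [stepCol, ind, h, PySem.List.pySetD, PySem.List.pySet?, PySem.List.pyIdx?,
      getD0, getD1, getD2] <;> norm_num

lemma cs2 (xo : String) (r : List String) (q0 q1 q2 : Int) :
    stepCol xo [q0,q1,q2] r 2 = [q0, q1, q2 + ind (PySem.List.pyGetD r 2 "") xo] := by
  by_cases h : PySem.List.pyGetD r 2 "" = xo <;>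
    simp [stepCol, ind, h, PySem.List.pySetD, PySem.List.pySet?, PySem.List.pyIdx?,
      getD0, getD1, getD2] <;> norm_num

-- count of xo down column k (what A's column scan computes)
def colC (xo : String) (m : List (List String)) (k : Int) : Int :=
  ((List.count xo (m.map (fun r => PySem.List.pyGetD r k "")) : Nat) : Int)

-- one row of B's column pass
lemma colPass_eval (xo : String) (r : List String) (q0 q1 q2 : Int) :
    colPass xo [q0, q1, q2] r
    = [q0 + ind (PySem.List.pyGetD r 0 "") xo, q1 + ind (PySem.List.pyGetD r 1 "") xo,
       q2 + ind (PySem.List.pyGetD r 2 "") xo] := by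
  simp only [colPass, pyRange3, List.foldl_cons, List.foldl_nil]
  rw [cs0, cs1, cs2]

-- B's whole column pass
lemma col_fold (xo : String) (m : List (List String)) (q0 q1 q2 : Int) :
    m.foldl (fun col r => colPass xo col r) [q0, q1, q2]
    = [q0 + colC xo m 0, q1 + colC xo m 1, q2 + colC xo m 2] := by
  induction m generalizing q0 q1 q2 with
  | nil => simp [colC]
  | cons r m ih =>
      simp only [List.foldl_cons]
      rw [colPass_eval, ih]
      simp only [colC, List.map_cons, count_cons_int, List.cons.injEq, and_true]
      refine ⟨by ring, by ring, by ring⟩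

-- the whole of B on a board of the admitted shape
lemma B_eval (xo a0 a1 a2 b0 b1 b2 c0 c1 c2 : String) (ta tb tc : List String)
    (rest : List (List String)) :
    count_XO_alt ((a0::a1::a2::ta) :: (b0::b1::b2::tb) :: (c0::c1::c2::tc) :: rest) xo
    = [0 + ind a0 xo + ind a1 xo + ind a2 xo + ((List.count xo ta : Nat) : Int),
       0 + ind b0 xo + ind b1 xo + ind b2 xo + ((List.count xo tb : Nat) : Int),
       0 + ind c0 xo + ind c1 xo + ind c2 xo + ((List.count xo tc : Nat) : Int),
       0 + ind a0 xo + ind b0 xo + ind c0 xo + colC xo rest 0,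
       0 + ind a1 xo + ind b1 xo + ind c1 xo + colC xo rest 1,
       0 + ind a2 xo + ind b2 xo + ind c2 xo + colC xo rest 2,
       0 + ind a0 xo + ind b1 xo + ind c2 xo,
       0 + ind a2 xo + ind b1 xo + ind c0 xo] := by
  simp only [count_XO_alt, pyRange3, List.foldl_cons, List.foldl_nil]
  rw [getD0, getD1, getD2, inner_row0, inner_row1, inner_row2]
  rw [colPass_eval, colPass_eval, colPass_eval]
  simp only [getD0, getD1, getD2]
  rw [col_fold]
  rfl

-- A's row counters on a board of the admitted shape
lemma rowA0 (xo : String) (r0 : List String) (m : List (List String)) :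
    countRow (r0 :: m) 0 xo = ((List.count xo r0 : Nat) : Int) := by
  simp [countRow, PySem.List.count, PySem.List.pyGetD, PySem.List.pyGet?, PySem.List.pyIdx?]

lemma rowA1 (xo : String) (r0 r1 r2 : List String) (m : List (List String)) :
    countRow (r0 :: r1 :: r2 :: m) 1 xo = ((List.count xo r1 : Nat) : Int) := by
  rw [countRow, getD1]
  simp [PySem.List.count]

lemma rowA2 (xo : String) (r0 r1 r2 : List String) (m : List (List String)) :
    countRow (r0 :: r1 :: r2 :: m) 2 xo = ((List.count xo r2 : Nat) : Int) := by
  rw [countRow, getD2]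
  simp [PySem.List.count]

-- ===== VERDICT (by name: the statement is the Claim_ definition above) =====
theorem count_XO_spec : Claim_equal_count_XO := by
  intro m xo _ hpre
  obtain ⟨hm, hrows⟩ := hpre
  match m, hm with
  | r0 :: r1 :: r2 :: rest, _ =>
    match r0, hrows r0 (by simp), r1, hrows r1 (by simp), r2, hrows r2 (by simp) with
    | a0 :: a1 :: a2 :: ta, _, b0 :: b1 :: b2 :: tb, _, c0 :: c1 :: c2 :: tc, _ =>
      show Spec_count_XO _ _ _
      unfold Spec_count_XO
      rw [B_eval]
      simp only [count_XO, pyRange3, List.foldl_cons, List.foldl_nil, List.nil_append,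
        List.cons_append]
      rw [rowA0, rowA1, rowA2]
      simp only [countCol, countDiag1, countDiag2, pyRange3, List.map_cons, List.map_nil,
        PySem.List.count, getD0, getD1, getD2, count_cons_int, colC, List.count_nil,
        Nat.cast_zero, List.cons.injEq, and_true]
      simp only [show (2:Int) - 0 = 2 from by norm_num, show (2:Int) - 1 = 1 from by norm_num,
        show (2:Int) - 2 = 0 from by norm_num, getD0, getD1, getD2]
      refine ⟨by ring, by ring, by ring, by ring, by ring, by ring, by ring, by ring⟩
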